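-- pv_equiv track=rewrite | github.com/jtvandijk/kde-repo | fn_kde_cnt.py | create_lookup
-- ===== SOURCE A (Python) =====
-- def create_lookup(coord):
--     record = dict()
--     sorted_data = sorted(coord)
--     for x,y in sorted_data:
--         if x in record.keys():
--             record[x][y] = None
--         else:
--             record[x] = dict()
--             record[x][y] = None
--     return record
-- ===== SOURCE B (Python) =====
-- def create_lookup(coord):
--     # Bucket y's by x in one pass, then sort the keys and each bucket.
--     groups = {}
--     for x, y in coord:
--         groups.setdefault(x, []).append(y)
--     return {x: dict.fromkeys(sorted(groups[x])) for x in sorted(groups)}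
-- ===== Notes on version B (the rewrite author's own statement) =====
-- stated objective: alternative
-- what changed: A sorts the whole (x,y) list and builds the nested dict in one insertion loop with membership tests; B buckets y's by x in one unsorted pass, then sorts the key list and each bucket and assembles each inner dict with dict.fromkeys.
import Mathlib
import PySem

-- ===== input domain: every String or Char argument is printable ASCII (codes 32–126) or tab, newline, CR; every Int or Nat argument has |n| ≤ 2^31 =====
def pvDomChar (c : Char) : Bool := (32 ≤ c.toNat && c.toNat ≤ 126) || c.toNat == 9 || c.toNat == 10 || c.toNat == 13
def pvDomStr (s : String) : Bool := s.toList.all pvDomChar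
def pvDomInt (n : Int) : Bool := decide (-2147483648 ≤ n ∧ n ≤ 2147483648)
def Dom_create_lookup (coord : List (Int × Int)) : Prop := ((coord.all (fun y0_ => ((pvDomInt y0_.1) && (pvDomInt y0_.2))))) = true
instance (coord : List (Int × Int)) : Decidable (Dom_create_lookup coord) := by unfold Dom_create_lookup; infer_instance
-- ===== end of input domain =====

-- B replaces A's sort-everything-then-insert-with-membership-tests by one bucketing pass
-- followed by sorting the key list and each bucket (objective: alternative decomposition).

-- ===== PORT A =====
def create_lookup (coord : List (Int × Int)) : List (Int × List (Int × Option Int)) :=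
  let sorted_data := PySem.List.sorted2 coord (fun p => p.1) (fun p => p.2)
  let record := sorted_data.foldl
    (fun (record : PySem.Dict Int (PySem.Dict Int (Option Int))) xy =>
      if record.contains xy.1 then
        record.modify xy.1 PySem.Dict.empty (fun inner => inner.insert xy.2 none)
      else
        let record := record.insert xy.1 PySem.Dict.empty
        record.modify xy.1 PySem.Dict.empty (fun inner => inner.insert xy.2 none))
    PySem.Dict.empty
  record.items.map (fun p => (p.1, p.2.items))

-- ===== PORT B =====
def create_lookup_alt (coord : List (Int × Int)) : List (Int × List (Int × Option Int)) :=
  let groups : PySem.Dict Int (List Int) :=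
    coord.foldl (fun g xy => g.modify xy.1 [] (fun ys => ys ++ [xy.2])) PySem.Dict.empty
  (PySem.List.sorted groups.keys (fun k => k)).map
    (fun x => (x, (PySem.List.dedup (PySem.List.sorted (groups.getD x []) (fun k => k))).map
      (fun y => (y, (none : Option Int)))))

-- ===== PRECONDITION & SPEC =====
def Spec_create_lookup (coord : List (Int × Int)) (out : List (Int × List (Int × Option Int))) : Prop := out = create_lookup_alt coord
instance (coord : List (Int × Int)) (out : List (Int × List (Int × Option Int))) : Decidable (Spec_create_lookup coord out) := by unfold Spec_create_lookup; infer_instance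

-- ===== CLAIM (what is proved, stated in full; the proofs are below) =====
def Claim_equal_create_lookup : Prop := ∀ (coord : List (Int × Int)), Dom_create_lookup coord → Spec_create_lookup coord (create_lookup coord)

-- ===== LEMMAS AND PROOFS =====

-- The comparator sorted2 uses on (fst, snd), and the lexicographic ≤ it induces.
def beLex (a b : Int × Int) : Bool :=
  decide (a.1 < b.1) || (!decide (b.1 < a.1) && decide (a.2 < b.2))

def lexLe (a b : Int × Int) : Prop := a.1 ≤ b.1 ∧ (a.1 < b.1 ∨ a.2 ≤ b.2)

lemma beLex_true_lexLe {a b : Int × Int} (h : beLex a b = true) : lexLe a b := by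
  unfold beLex at h; unfold lexLe
  simp only [Bool.or_eq_true, Bool.and_eq_true, Bool.not_eq_true', decide_eq_true_eq,
    decide_eq_false_iff_not] at h
  omega

lemma beLex_false_lexLe {a b : Int × Int} (h : beLex a b = false) : lexLe b a := by
  unfold beLex at h; unfold lexLe
  simp only [Bool.or_eq_false_iff, Bool.and_eq_false_iff, Bool.not_eq_false',
    decide_eq_true_eq, decide_eq_false_iff_not] at h
  omega

lemma lexLe_trans {a b c : Int × Int} (h1 : lexLe a b) (h2 : lexLe b c) : lexLe a c := by
  unfold lexLe at *; omega

lemma insertBy_beLex_pairwise (x : Int × Int) (ys : List (Int × Int))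
    (h : ys.Pairwise lexLe) :
    (PySem.List.insertBy beLex x ys).Pairwise lexLe := by
  induction ys with
  | nil => simp [PySem.List.insertBy]
  | cons y t ih =>
    rw [PySem.List.insertBy]
    rcases List.pairwise_cons.mp h with ⟨hy, ht⟩
    by_cases hb : beLex x y = true
    · simp only [hb, if_pos]
      refine List.pairwise_cons.mpr ⟨?_, h⟩
      intro z hz
      rcases List.mem_cons.mp hz with rfl | hz
      · exact beLex_true_lexLe hb
      · exact lexLe_trans (beLex_true_lexLe hb) (hy z hz)
    · rw [if_neg hb]
      refine List.pairwise_cons.mpr ⟨?_, ih ht⟩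
      intro z hz
      rcases (PySem.List.insertBy_mem_iff beLex x z t).mp hz with rfl | hz
      · exact beLex_false_lexLe (Bool.not_eq_true _ ▸ (by simpa using hb))
      · exact hy z hz

lemma foldl_insertBy_pairwise (xs : List (Int × Int)) (acc : List (Int × Int))
    (h : acc.Pairwise lexLe) :
    (xs.foldl (fun acc x => PySem.List.insertBy beLex x acc) acc).Pairwise lexLe := by
  induction xs generalizing acc with
  | nil => exact h
  | cons a t ih => exact ih _ (insertBy_beLex_pairwise a acc h)

lemma sorted2_pairwise_lex (coord : List (Int × Int)) :
    (PySem.List.sorted2 coord (fun p => p.1) (fun p => p.2)).Pairwise lexLe := by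
  simpa [PySem.List.sorted2, beLex] using foldl_insertBy_pairwise coord [] (by simp)

-- ofList keeps (the first occurrence of) each element, in order: a sublist.
lemma ofList_sublist {α : Type} [BEq α] [LawfulBEq α] (l : List α) :
    (PySem.Set.ofList l).Sublist l := by
  induction l with
  | nil => simp [PySem.Set.ofList]
  | cons x t ih =>
    rw [PySem.Set.ofList_cons, PySem.Set.discard]
    exact (List.filter_sublist.trans ih).cons₂ x

-- A's fold step (both branches) is a single dict-modify.
lemma stepA_eq (d : PySem.Dict Int (PySem.Dict Int (Option Int))) (xy : Int × Int) :
    (if d.contains xy.1 then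
        d.modify xy.1 PySem.Dict.empty (fun inner => inner.insert xy.2 none)
      else
        let d' := d.insert xy.1 PySem.Dict.empty
        d'.modify xy.1 PySem.Dict.empty (fun inner => inner.insert xy.2 none))
      = d.modify xy.1 PySem.Dict.empty (fun inner => inner.insert xy.2 none) := by
  by_cases h : d.contains xy.1
  · rw [if_pos h]
  · rw [if_neg h]
    show (d.insert xy.1 PySem.Dict.empty).modify xy.1 PySem.Dict.empty _ = _
    rw [PySem.Dict.modify, PySem.Dict.modify, PySem.Dict.getD_insert_self,
      PySem.Dict.insert_insert_self, PySem.Dict.getD_of_not_contains d _ (by simpa using h)]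

-- Per-key contents of A's fold.
lemma getD_foldl_stepA (s : List (Int × Int)) (d : PySem.Dict Int (PySem.Dict Int (Option Int))) (x : Int) :
    (s.foldl (fun d xy => d.modify xy.1 PySem.Dict.empty (fun inner => inner.insert xy.2 none)) d).getD x PySem.Dict.empty
      = ((s.filter (fun p => p.1 == x)).map (fun p => p.2)).foldl
          (fun inner y => inner.insert y none) (d.getD x PySem.Dict.empty) := by
  induction s generalizing d with
  | nil => rfl
  | cons a t ih =>
    simp only [List.foldl_cons, List.filter_cons]
    by_cases ha : a.1 = x
    · simp only [ha, beq_self_eq_true, if_pos, List.map_cons, List.foldl_cons]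
      subst ha
      rw [ih, PySem.Dict.getD_modify_self]
    · rw [if_neg (by simpa using ha), ih,
        PySem.Dict.getD_modify_of_ne d PySem.Dict.empty _ (Ne.symm ha)]

-- Items of an insert-none loop from an all-none dict: ordered dedup, paired with none.
lemma items_foldl_insert_none (ys : List Int) (s : List Int) :
    ((ys.foldl (fun inner y => inner.insert y none)
        (PySem.Dict.mk (s.map (fun y => ((y : Int), (none : Option Int)))))).items)
      = (PySem.Set.update s ys).map (fun y => (y, none)) := by
  induction ys generalizing s with
  | nil => simp [PySem.Set.update]
  | cons y t ih =>
    simp only [List.foldl_cons, PySem.Set.update, PySem.Set.add]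
    by_cases hy : y ∈ s
    · have hc : (PySem.Dict.mk (s.map (fun y => ((y : Int), (none : Option Int))))).contains y
          = true := by
        simp only [PySem.Dict.contains_mk, List.any_map, Function.comp, List.any_eq_true]
        exact ⟨y, hy, by simp⟩
      have hins : (PySem.Dict.mk (s.map (fun y => ((y : Int), (none : Option Int))))).insert y none
          = PySem.Dict.mk (s.map (fun y => ((y : Int), (none : Option Int)))) := by
        rw [PySem.Dict.insert, if_pos hc]
        congr 1
        rw [List.map_map]
        apply List.map_congr_left
        intro z _
        simp only [Function.comp]
        by_cases hz : z = y
        · subst hz; simp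
        · simp [hz]
      have hadd : (if PySem.Set.contains s y = true then s else s ++ [y]) = s := by
        simp [PySem.Set.contains, hy]
      rw [hins, hadd]
      simpa [PySem.Set.update] using ih s
    · have hc : (PySem.Dict.mk (s.map (fun y => ((y : Int), (none : Option Int))))).contains y
          = false := by
        simp only [PySem.Dict.contains_mk, List.any_map, Function.comp, List.any_eq_false]
        intro z hz
        exact fun h => hy ((by simpa using h : z = y) ▸ hz)
      have hins : (PySem.Dict.mk (s.map (fun y => ((y : Int), (none : Option Int))))).insert y none
          = PySem.Dict.mk ((s ++ [y]).map (fun y => ((y : Int), (none : Option Int)))) := by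
        rw [PySem.Dict.insert, if_neg (by rw [hc]; simp)]
        simp
      have hadd : (if PySem.Set.contains s y = true then s else s ++ [y]) = s ++ [y] := by
        simp [PySem.Set.contains, hy]
      rw [hins, hadd]
      simpa [PySem.Set.update] using ih (s ++ [y])

lemma sorted2_map_fst_pairwise (coord : List (Int × Int)) :
    ((PySem.List.sorted2 coord (fun p => p.1) (fun p => p.2)).map (fun p => p.1)).Pairwise
      (fun a b => a ≤ b) :=
  List.pairwise_map.mpr ((sorted2_pairwise_lex coord).imp (fun h => h.1))

theorem create_lookup_eq_canon (coord : List (Int × Int)) :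
    create_lookup coord = create_lookup_alt coord := by
  unfold create_lookup create_lookup_alt
  simp only []
  set s := PySem.List.sorted2 coord (fun p => p.1) (fun p => p.2) with hs
  rw [show (fun (record : PySem.Dict Int (PySem.Dict Int (Option Int))) xy =>
      if record.contains xy.1 then
        record.modify xy.1 PySem.Dict.empty (fun inner => inner.insert xy.2 none)
      else
        let record := record.insert xy.1 PySem.Dict.empty
        record.modify xy.1 PySem.Dict.empty (fun inner => inner.insert xy.2 none))
    = (fun d xy => d.modify xy.1 PySem.Dict.empty (fun inner => inner.insert xy.2 none))
    from funext fun d => funext fun xy => stepA_eq d xy]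
  set record := s.foldl
    (fun (d : PySem.Dict Int (PySem.Dict Int (Option Int))) xy =>
      d.modify xy.1 PySem.Dict.empty (fun inner => inner.insert xy.2 none))
    PySem.Dict.empty with hrec
  have hkeys : record.keys = PySem.Set.ofList (s.map (fun p => p.1)) := by
    rw [hrec, PySem.Dict.keys_foldl_modify_key s (fun xy => xy.1) PySem.Dict.empty
      (fun _ xy => fun inner => inner.insert xy.2 none) PySem.Dict.empty,
      PySem.Dict.keys_empty, PySem.Set.ofList_eq_foldl]
    rfl
  have hnodup : record.keys.Nodup := hkeys ▸ PySem.Set.nodup_ofList _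
  have hgetD : ∀ x : Int, record.getD x PySem.Dict.empty
      = ((s.filter (fun p => p.1 == x)).map (fun p => p.2)).foldl
          (fun inner y => inner.insert y none) PySem.Dict.empty := by
    intro x
    rw [hrec, getD_foldl_stepA, PySem.Dict.getD_empty]
  have hinner : ∀ x : Int, (record.getD x PySem.Dict.empty).items
      = (PySem.Set.ofList ((s.filter (fun p => p.1 == x)).map (fun p => p.2))).map
          (fun y => (y, (none : Option Int))) := by
    intro x
    rw [hgetD x]
    have h0 := items_foldl_insert_none ((s.filter (fun p => p.1 == x)).map (fun p => p.2)) []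
    simpa [PySem.Set.update, PySem.Set.ofList_eq_foldl] using h0
  have hitems : record.items = record.keys.map (fun k => (k, record.getD k PySem.Dict.empty)) :=
    PySem.Dict.items_eq_map_keys record hnodup _
  have hgkeys : (coord.foldl (fun (g : PySem.Dict Int (List Int)) xy =>
        g.modify xy.1 [] (fun ys => ys ++ [xy.2])) PySem.Dict.empty).keys
      = PySem.Set.ofList (coord.map (fun p => p.1)) := by
    rw [PySem.Dict.keys_foldl_modify_key coord (fun xy => xy.1) []
      (fun _ xy => fun ys => ys ++ [xy.2]) PySem.Dict.empty,
      PySem.Dict.keys_empty, PySem.Set.ofList_eq_foldl]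
    rfl
  have hggetD : ∀ x : Int, (coord.foldl (fun (g : PySem.Dict Int (List Int)) xy =>
        g.modify xy.1 [] (fun ys => ys ++ [xy.2])) PySem.Dict.empty).getD x []
      = (coord.filter (fun p => p.1 == x)).map (fun p => p.2) := by
    intro x
    rw [PySem.Dict.getD_foldl_modify_append coord PySem.Dict.empty x, PySem.Dict.getD_empty,
      List.nil_append]
  have hperm : s.Perm coord := PySem.List.sorted2_perm coord _ _ _
  have houter : PySem.List.sorted (PySem.Set.ofList (coord.map (fun p => p.1))) (fun k => k)
      = PySem.Set.ofList (s.map (fun p => p.1)) := by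
    apply PySem.List.sorted_eq_of_perm_of_pairwise_lt
    · refine (List.perm_ext_iff_of_nodup (PySem.Set.nodup_ofList _) (PySem.Set.nodup_ofList _)).mpr ?_
      intro a
      rw [PySem.Set.mem_ofList, PySem.Set.mem_ofList]
      exact (hperm.map (fun p => p.1)).mem_iff
    · have hle : (PySem.Set.ofList (s.map (fun p => p.1))).Pairwise (fun a b => a ≤ b) :=
        (sorted2_map_fst_pairwise coord).sublist (ofList_sublist _)
      have hne : (PySem.Set.ofList (s.map (fun p => p.1))).Pairwise (fun a b => a ≠ b) :=
        PySem.Set.nodup_ofList _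
      exact (hle.and hne).imp (fun h => lt_of_le_of_ne h.1 h.2)
  have hinnerEq : ∀ x : Int,
      PySem.List.sorted ((coord.filter (fun p => p.1 == x)).map (fun p => p.2)) (fun k => k)
        = (s.filter (fun p => p.1 == x)).map (fun p => p.2) := by
    intro x
    apply PySem.List.sorted_id_eq_of_perm_of_pairwise
    · exact (hperm.filter _).map _
    · refine List.pairwise_map.mpr ?_
      have hp : (s.filter (fun p => p.1 == x)).Pairwise lexLe :=
        (sorted2_pairwise_lex coord).sublist (List.filter_sublist)
      refine hp.imp_of_mem ?_
      intro a b ha hb hab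
      have hax : a.1 = x := by simpa using (List.mem_filter.mp ha).2
      have hbx : b.1 = x := by simpa using (List.mem_filter.mp hb).2
      unfold lexLe at hab
      omega
  rw [hitems, hkeys, List.map_map, ← houter, hgkeys]
  apply List.map_congr_left
  intro x _
  simp only [Function.comp]
  rw [hinner x, hggetD x, hinnerEq x, PySem.List.dedup_eq_ofList]

-- ===== VERDICT (by name: the statement is the Claim_ definition above) =====
theorem create_lookup_spec : Claim_equal_create_lookup := by
  intro coord _
  unfold Spec_create_lookup
  exact create_lookup_eq_canon coord
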